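-- pv_equiv track=rewrite | github.com/obadahmh/ontological-cbm | src/concepts/aggregation.py | canonicalize_location
-- ===== SOURCE A (Python) =====
-- from typing import Any, Dict, Iterable, List, Mapping, MutableMapping, Optional, Sequence, Tuple
--
-- def canonicalize_location(mods: Sequence[str]) -> Optional[str]:
--     tokens: List[str] = []
--     for mod in mods:
--         cleaned = "".join(ch.lower() if ch.isalnum() or ch.isspace() else " " for ch in mod)
--         normalized = " ".join(cleaned.split())
--         if normalized:
--             tokens.append(normalized)
--     if not tokens:
--         return None
--     return " ".join(tokens)
-- ===== SOURCE B (Python) =====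
-- # Single-pass tokenizer: a running buffer of lowercased alnum chars, flushed at
-- # each non-alnum char and at each mod boundary; no intermediate cleaned string,
-- # no str.split().
-- def canonicalize_location(mods):
--     words = []
--     current = []
--     for mod in mods:
--         for ch in mod:
--             if ch.isalnum():
--                 current.append(ch.lower())
--             elif current:
--                 words.append("".join(current))
--                 current = []
--         if current:
--             words.append("".join(current))
--             current = []
--     if not words:
--         return None
--     return " ".join(words)
-- ===== Notes on version B (the rewrite author's own statement) =====
-- stated objective: alternative
-- what changed: Replaces A's per-mod pipeline (build a cleaned string, re-split it on whitespace, re-join, collect, join again) by a single-pass character tokenizer with a running word buffer flushed at non-alnum chars and mod boundaries; no intermediate cleaned string and no split().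
import Mathlib
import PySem

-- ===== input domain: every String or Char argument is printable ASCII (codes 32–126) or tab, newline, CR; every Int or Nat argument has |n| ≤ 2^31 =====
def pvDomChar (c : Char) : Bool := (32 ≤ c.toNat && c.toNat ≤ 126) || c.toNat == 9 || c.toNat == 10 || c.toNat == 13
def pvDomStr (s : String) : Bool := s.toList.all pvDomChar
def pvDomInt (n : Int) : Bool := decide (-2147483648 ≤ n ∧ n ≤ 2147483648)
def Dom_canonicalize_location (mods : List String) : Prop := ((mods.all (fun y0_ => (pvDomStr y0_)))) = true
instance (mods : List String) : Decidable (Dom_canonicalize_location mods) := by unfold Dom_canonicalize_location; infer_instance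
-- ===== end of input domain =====

-- B replaces A's per-mod clean/split/join pipeline with a single-pass buffer tokenizer (objective: alternative decomposition, same cost).

-- ===== PORT A =====
def pvClean (ch : Char) : Char :=
  if PySem.Chars.isalnum ch || PySem.Chars.isspace ch then PySem.Chars.lowerChar ch else ' '

def canonicalize_location (mods : List String) : Option String :=
  let tokens := mods.foldl (fun toks mod =>
    let cleaned := mod.toList.map pvClean
    let normalized := PySem.Chars.join [' '] (PySem.Chars.split₀ cleaned)
    if normalized.isEmpty then toks else toks ++ [normalized]) []
  if tokens.isEmpty then none else some (String.ofList (PySem.Chars.join [' '] tokens))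

-- ===== PORT B =====
def pvStep (st : List (List Char) × List Char) (ch : Char) : List (List Char) × List Char :=
  if PySem.Chars.isalnum ch then (st.1, st.2 ++ [PySem.Chars.lowerChar ch])
  else if st.2.isEmpty then st else (st.1 ++ [st.2], [])

def pvFlush (st : List (List Char) × List Char) : List (List Char) :=
  if st.2.isEmpty then st.1 else st.1 ++ [st.2]

def canonicalize_location_alt (mods : List String) : Option String :=
  let words := mods.foldl (fun ws mod => pvFlush (mod.toList.foldl pvStep (ws, []))) []
  if words.isEmpty then none else some (String.ofList (PySem.Chars.join [' '] words))

-- ===== PRECONDITION & SPEC =====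
def Spec_canonicalize_location (mods : List String) (out : Option String) : Prop := out = canonicalize_location_alt mods
instance (mods : List String) (out : Option String) : Decidable (Spec_canonicalize_location mods out) := by unfold Spec_canonicalize_location; infer_instance

-- ===== CLAIM (what is proved, stated in full; the proofs are below) =====
def Claim_equal_canonicalize_location : Prop := ∀ (mods : List String), Dom_canonicalize_location mods → Spec_canonicalize_location mods (canonicalize_location mods)

-- ===== LEMMAS AND PROOFS =====

-- reference tokenizer: the words one mod contributes, given a pending buffer
def pvTok : List Char → List Char → List (List Char)
  | [], buf => if buf.isEmpty then [] else [buf]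
  | c :: cs, buf =>
    if PySem.Chars.isalnum c then pvTok cs (buf ++ [PySem.Chars.lowerChar c])
    else if buf.isEmpty then pvTok cs buf else buf :: pvTok cs []

theorem pvCharLe (c d : Char) : (c ≤ d) ↔ c.toNat ≤ d.toNat := by
  rw [Char.le_def]; exact UInt32.le_iff_toNat_le

theorem pvOfNatToNat (n : Nat) (h : n < 55296) : (Char.ofNat n).toNat = n := by
  have hv : n.isValidChar := Or.inl h
  simp [Char.ofNat, hv, Char.toNat, Char.ofNatAux]

theorem pv_isupper_iff (c : Char) : PySem.Chars.isupper c = true ↔ 65 ≤ c.toNat ∧ c.toNat ≤ 90 := by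
  simp only [PySem.Chars.isupper, Bool.and_eq_true, decide_eq_true_eq, pvCharLe]
  rw [show ('A').toNat = 65 from rfl, show ('Z').toNat = 90 from rfl]

theorem pv_islower_iff (c : Char) : PySem.Chars.islower c = true ↔ 97 ≤ c.toNat ∧ c.toNat ≤ 122 := by
  simp only [PySem.Chars.islower, Bool.and_eq_true, decide_eq_true_eq, pvCharLe]
  rw [show ('a').toNat = 97 from rfl, show ('z').toNat = 122 from rfl]

theorem pv_isdigit_iff (c : Char) : PySem.Chars.isdigit c = true ↔ 48 ≤ c.toNat ∧ c.toNat ≤ 57 := by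
  simp only [PySem.Chars.isdigit, Bool.and_eq_true, decide_eq_true_eq, pvCharLe]
  rw [show ('0').toNat = 48 from rfl, show ('9').toNat = 57 from rfl]

theorem pv_isalnum_iff (c : Char) : PySem.Chars.isalnum c = true ↔
    ((65 ≤ c.toNat ∧ c.toNat ≤ 90) ∨ (97 ≤ c.toNat ∧ c.toNat ≤ 122) ∨ (48 ≤ c.toNat ∧ c.toNat ≤ 57)) := by
  simp only [PySem.Chars.isalnum, PySem.Chars.isalpha, Bool.or_eq_true,
    pv_isupper_iff, pv_islower_iff, pv_isdigit_iff]
  tauto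

theorem pv_isspace_iff (c : Char) : PySem.Chars.isspace c = true ↔
    (c.toNat = 32 ∨ (9 ≤ c.toNat ∧ c.toNat ≤ 13) ∨ (28 ≤ c.toNat ∧ c.toNat ≤ 31) ∨ c.toNat = 133 ∨
     c.toNat = 160 ∨ c.toNat = 5760 ∨ (8192 ≤ c.toNat ∧ c.toNat ≤ 8202) ∨ c.toNat = 8232 ∨
     c.toNat = 8233 ∨ c.toNat = 8239 ∨ c.toNat = 8287 ∨ c.toNat = 12288) := by
  simp only [PySem.Chars.isspace, Bool.or_eq_true, Bool.and_eq_true, decide_eq_true_eq]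
  omega

theorem pv_lowerChar_toNat (c : Char) :
    (PySem.Chars.lowerChar c).toNat = if 65 ≤ c.toNat ∧ c.toNat ≤ 90 then c.toNat + 32 else c.toNat := by
  unfold PySem.Chars.lowerChar
  by_cases hu : PySem.Chars.isupper c = true
  · have hb := (pv_isupper_iff c).mp hu
    rw [if_pos hu, if_pos hb]
    exact pvOfNatToNat _ (by omega)
  · rw [if_neg hu, if_neg (fun hh => hu ((pv_isupper_iff c).mpr hh))]

theorem pvClean_alnum (c : Char) (h : PySem.Chars.isalnum c = true) :
    pvClean c = PySem.Chars.lowerChar c ∧ PySem.Chars.isspace (PySem.Chars.lowerChar c) = false := by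
  constructor
  · simp [pvClean, h]
  · have ha := (pv_isalnum_iff c).mp h
    rw [← Bool.not_eq_true, pv_isspace_iff, pv_lowerChar_toNat]
    rcases ha with h1 | h1 | h1
    · rw [if_pos h1]; omega
    · rw [if_neg (by omega)]; omega
    · rw [if_neg (by omega)]; omega

theorem pvClean_not_alnum (c : Char) (h : PySem.Chars.isalnum c = false) :
    PySem.Chars.isspace (pvClean c) = true := by
  unfold pvClean
  rw [h, Bool.false_or]
  by_cases hs : PySem.Chars.isspace c = true
  · rw [if_pos hs, pv_isspace_iff, pv_lowerChar_toNat,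
      if_neg (by have := (pv_isspace_iff c).mp hs; omega)]
    exact (pv_isspace_iff c).mp hs
  · rw [if_neg hs]
    decide

theorem pv_go_eq (cs : List Char) : ∀ (cur : List Char) (acc : List (List Char)),
    PySem.Chars.split₀.go (cs.map pvClean) cur acc = acc.reverse ++ pvTok cs cur.reverse := by
  induction cs with
  | nil =>
    intro cur acc
    rw [List.map_nil, PySem.Chars.split₀.go, pvTok]
    by_cases h : cur = [] <;> simp [h]
  | cons c cs ih =>
    intro cur acc
    rw [List.map_cons, PySem.Chars.split₀.go, pvTok]
    cases h : PySem.Chars.isalnum c with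
    | true =>
      obtain ⟨h1, h2⟩ := pvClean_alnum c h
      rw [h1, h2]
      simp only [Bool.false_eq_true, if_false, ih]
      simp [List.reverse_cons]
    | false =>
      rw [pvClean_not_alnum c h]
      simp only [if_true]
      by_cases hc : cur = []
      · simp [hc, ih]
      · have : cur.isEmpty = false := by simp [hc]
        have : cur.reverse.isEmpty = false := by simp [hc]
        simp only [‹cur.isEmpty = false›, ‹cur.reverse.isEmpty = false›, Bool.false_eq_true,
          if_false, ih]
        simp

theorem pv_split_eq (cs : List Char) :
    PySem.Chars.split₀ (cs.map pvClean) = pvTok cs [] := by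
  have := pv_go_eq cs [] []
  simpa [PySem.Chars.split₀] using this

theorem pv_fold_eq (cs : List Char) : ∀ (ws : List (List Char)) (buf : List Char),
    pvFlush (cs.foldl pvStep (ws, buf)) = ws ++ pvTok cs buf := by
  induction cs with
  | nil =>
    intro ws buf
    rw [List.foldl_nil, pvTok, pvFlush]
    by_cases h : buf = [] <;> simp [h]
  | cons c cs ih =>
    intro ws buf
    rw [List.foldl_cons, pvTok]
    cases h : PySem.Chars.isalnum c with
    | true => simp only [pvStep, h, if_true, ih]
    | false =>
      by_cases hb : buf = []
      · simp [pvStep, h, hb, ih]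
      · have hb' : buf.isEmpty = false := by simp [hb]
        simp only [pvStep, h, hb', Bool.false_eq_true, if_false, ih]
        simp

theorem pvTok_ne_nil (cs : List Char) : ∀ (buf : List Char), ∀ w ∈ pvTok cs buf, w ≠ [] := by
  induction cs with
  | nil =>
    intro buf w hw
    rw [pvTok] at hw
    by_cases h : buf = [] <;> simp [h] at hw
    simp [hw, h]
  | cons c cs ih =>
    intro buf w hw
    rw [pvTok] at hw
    cases h : PySem.Chars.isalnum c with
    | true => rw [h] at hw; exact ih _ w (by simpa using hw)
    | false =>
      rw [h] at hw
      by_cases hb : buf = []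
      · simp [hb] at hw; exact ih _ w hw
      · have hb' : buf.isEmpty = false := by simp [hb]
        simp only [hb', Bool.false_eq_true, if_false] at hw
        rcases List.mem_cons.mp hw with rfl | hw
        · exact hb
        · exact ih _ w hw

theorem pv_join_cons (sep : List Char) (x : List Char) (l : List (List Char)) (h : l ≠ []) :
    PySem.Chars.join sep (x :: l) = x ++ sep ++ PySem.Chars.join sep l := by
  cases l with
  | nil => exact absurd rfl h
  | cons y l' => rw [PySem.Chars.join_cons_cons]

theorem pv_join_ne_nil (sep : List Char) (ws : List (List Char)) (h : ∀ w ∈ ws, w ≠ []) :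
    (PySem.Chars.join sep ws = []) ↔ ws = [] := by
  cases ws with
  | nil => simp [PySem.Chars.join_nil]
  | cons w l =>
    have hw := h w (by simp)
    cases l with
    | nil => rw [PySem.Chars.join_singleton]; simp [hw]
    | cons x l' =>
      rw [PySem.Chars.join_cons_cons]
      simp [List.append_eq_nil_iff, hw]

theorem pv_join_append (sep : List Char) : ∀ (a b : List (List Char)), a ≠ [] → b ≠ [] →
    PySem.Chars.join sep (a ++ b) = PySem.Chars.join sep a ++ sep ++ PySem.Chars.join sep b
  | [], _, ha, _ => absurd rfl ha
  | [x], y :: b', _, _ => by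
    rw [List.cons_append, List.nil_append, PySem.Chars.join_cons_cons, PySem.Chars.join_singleton]
  | x :: z :: a'', b, _, hb => by
    have ih := pv_join_append sep (z :: a'') b (by simp) hb
    simp only [List.cons_append] at ih ⊢
    rw [PySem.Chars.join_cons_cons, ih, PySem.Chars.join_cons_cons]
    simp [List.append_assoc]

theorem pv_join_flatten (gs : List (List (List Char))) :
    PySem.Chars.join [' '] ((gs.filter (fun g => !g.isEmpty)).map (PySem.Chars.join [' '])) =
      PySem.Chars.join [' '] gs.flatten := by
  induction gs with
  | nil => simp
  | cons g gs ih =>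
    rw [List.flatten_cons, List.filter_cons]
    by_cases hg : g = []
    · simp only [hg, List.nil_append, List.isEmpty_nil, Bool.not_true, Bool.false_eq_true,
        if_false]
      exact ih
    · have hg' : (!g.isEmpty) = true := by simp [hg]
      rw [if_pos hg', List.map_cons]
      by_cases hf : gs.flatten = []
      · have hfil : gs.filter (fun g => !g.isEmpty) = [] := by
          rw [List.filter_eq_nil_iff]
          intro x hx
          simp [List.flatten_eq_nil_iff.mp hf x hx]
        rw [hfil, hf, List.append_nil, List.map_nil, PySem.Chars.join_singleton]
      · have hfil : gs.filter (fun g => !g.isEmpty) ≠ [] := by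
          intro hc
          apply hf
          rw [List.flatten_eq_nil_iff]
          intro x hx
          by_contra hx'
          have hmem : x ∈ gs.filter (fun g => !g.isEmpty) :=
            List.mem_filter.mpr ⟨hx, by simp [hx']⟩
          simp [hc] at hmem
        rw [pv_join_cons _ _ _ (by simpa using hfil), ih,
          pv_join_append [' '] g gs.flatten hg hf]

theorem pv_filter_nil_iff (gs : List (List (List Char))) :
    gs.filter (fun g => !g.isEmpty) = [] ↔ gs.flatten = [] := by
  rw [List.filter_eq_nil_iff, List.flatten_eq_nil_iff]
  constructor <;> intro h x hx
  · have := h x hx; simpa using this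
  · simp [h x hx]

theorem pv_A_fold (mods : List String) : ∀ (init : List (List Char)),
    mods.foldl (fun toks mod =>
      if (PySem.Chars.join [' '] (PySem.Chars.split₀ (mod.toList.map pvClean))).isEmpty then toks
      else toks ++ [PySem.Chars.join [' '] (PySem.Chars.split₀ (mod.toList.map pvClean))]) init
    = init ++ ((mods.map (fun m => pvTok m.toList [])).filter (fun g => !g.isEmpty)).map
        (PySem.Chars.join [' ']) := by
  induction mods with
  | nil => intro init; simp
  | cons m ms ih =>
    intro init
    rw [List.foldl_cons, List.map_cons, List.filter_cons]
    by_cases hg : pvTok m.toList [] = []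
    · have h1 : (PySem.Chars.join [' '] (PySem.Chars.split₀ (m.toList.map pvClean))).isEmpty = true := by
        rw [pv_split_eq, hg]; simp [PySem.Chars.join_nil]
      rw [if_pos h1, ih]
      simp [hg]
    · have h1 : (PySem.Chars.join [' '] (PySem.Chars.split₀ (m.toList.map pvClean))).isEmpty = false := by
        rw [pv_split_eq, List.isEmpty_eq_false_iff]
        exact fun hc => hg ((pv_join_ne_nil [' '] _ (pvTok_ne_nil m.toList [])).mp hc)
      rw [if_neg (by simp [h1]), ih]
      have hg' : (!(pvTok m.toList []).isEmpty) = true := by simp [hg]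
      rw [if_pos hg', pv_split_eq, List.map_cons]
      simp [List.append_assoc]

theorem pv_B_fold (mods : List String) : ∀ (init : List (List Char)),
    mods.foldl (fun ws mod => pvFlush (mod.toList.foldl pvStep (ws, []))) init
    = init ++ (mods.map (fun m => pvTok m.toList [])).flatten := by
  induction mods with
  | nil => intro init; simp
  | cons m ms ih =>
    intro init
    rw [List.foldl_cons, pv_fold_eq, ih, List.map_cons, List.flatten_cons]
    simp [List.append_assoc]

-- ===== VERDICT (by name: the statement is the Claim_ definition above) =====
theorem canonicalize_location_spec : Claim_equal_canonicalize_location := by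
  intro mods _
  unfold Spec_canonicalize_location
  show canonicalize_location mods = canonicalize_location_alt mods
  simp only [canonicalize_location, canonicalize_location_alt]
  rw [pv_A_fold, pv_B_fold, List.nil_append, List.nil_append]
  have hemp : ((( mods.map (fun m => pvTok m.toList [])).filter (fun g => !g.isEmpty)).map
      (PySem.Chars.join [' '])).isEmpty = (mods.map (fun m => pvTok m.toList [])).flatten.isEmpty := by
    by_cases hf : (mods.map (fun m => pvTok m.toList [])).flatten = []
    · simp [hf, (pv_filter_nil_iff _).mpr hf]
    · have hfil : (mods.map (fun m => pvTok m.toList [])).filter (fun g => !g.isEmpty) ≠ [] :=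
        fun hc => hf ((pv_filter_nil_iff _).mp hc)
      have hm : ((mods.map (fun m => pvTok m.toList [])).filter (fun g => !g.isEmpty)).map
          (PySem.Chars.join [' ']) ≠ [] := by simpa using hfil
      rw [List.isEmpty_eq_false_iff.mpr hm, List.isEmpty_eq_false_iff.mpr hf]
  rw [hemp, pv_join_flatten]
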